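-- pv_equiv track=rewrite | github.com/Snyderpf/TuesDayPython | Jtram.py | Jtram
-- ===== SOURCE A (Python) =====
-- def Jtram(n,exit,enter):
--     max_capacity = 0
--     curr_inside = 0
--     for i in range(n):
--         curr_inside  -= exit[i]
--         curr_inside  += enter[i]
--         max_capacity = max(max_capacity,curr_inside)
--
--     return max_capacity
-- ===== SOURCE B (Python) =====
-- def Jtram(n, exit, enter):
--     # Divide and conquer on the stop range: solve(lo, hi) returns
--     # (sum of deltas on [lo,hi), max prefix sum on [lo,hi) incl. the empty prefix).
--     # Merge rule: maxprefix(L++R) = max(maxprefix(L), sum(L) + maxprefix(R)).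
--     def solve(lo, hi):
--         if hi <= lo:
--             return (0, 0)
--         if hi - lo == 1:
--             d = enter[lo] - exit[lo]
--             return (d, max(0, d))
--         mid = (lo + hi) // 2
--         s1, m1 = solve(lo, mid)
--         s2, m2 = solve(mid, hi)
--         return (s1 + s2, max(m1, s1 + m2))
--     return solve(0, n)[1]
-- ===== Notes on version B (the rewrite author's own statement) =====
-- stated objective: alternative
-- what changed: A keeps a running occupancy and running maximum in one left-to-right loop; B computes the maximum prefix sum of the per-stop deltas by divide and conquer, recursively splitting the stop range at its midpoint and merging with maxprefix(L++R) = max(maxprefix L, sum L + maxprefix R).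
import Mathlib
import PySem

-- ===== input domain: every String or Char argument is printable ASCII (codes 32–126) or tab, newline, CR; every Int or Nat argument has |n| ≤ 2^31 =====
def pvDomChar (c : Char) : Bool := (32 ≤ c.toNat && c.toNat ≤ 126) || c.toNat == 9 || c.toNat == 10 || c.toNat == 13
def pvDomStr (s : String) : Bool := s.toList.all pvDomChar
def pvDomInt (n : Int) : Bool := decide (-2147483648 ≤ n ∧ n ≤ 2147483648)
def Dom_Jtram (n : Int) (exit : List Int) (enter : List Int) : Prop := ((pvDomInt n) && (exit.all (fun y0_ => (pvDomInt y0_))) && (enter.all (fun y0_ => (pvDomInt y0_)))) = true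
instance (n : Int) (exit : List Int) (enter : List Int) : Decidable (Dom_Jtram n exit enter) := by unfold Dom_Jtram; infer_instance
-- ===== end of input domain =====

-- B replaces A's fused linear scan with a divide-and-conquer max-prefix-sum computation (objective: alternative; return value only, no mutation).

-- ===== PORT A =====
-- A: one fused loop keeping (max_capacity, curr_inside); exit[i]/enter[i] ported with pyGetD, valid under Pre_.
def Jtram (n : Int) (exit : List Int) (enter : List Int) : Int :=
  ((PySem.List.pyRange 0 n 1).foldl
    (fun s i =>
      let ci := s.2 - PySem.List.pyGetD exit i 0 + PySem.List.pyGetD enter i 0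
      (max s.1 ci, ci))
    (0, 0)).1

-- ===== PORT B =====
-- B: divide and conquer; solve lo hi = (sum of deltas on [lo,hi), max prefix sum incl. empty prefix),
-- merged by maxprefix(L++R) = max(maxprefix L, sum L + maxprefix R).
def JtramSolve (exit enter : List Int) (lo hi : Int) : Int × Int :=
  if _h1 : hi ≤ lo then (0, 0)
  else if _h2 : hi - lo = 1 then
    let d := PySem.List.pyGetD enter lo 0 - PySem.List.pyGetD exit lo 0
    (d, max 0 d)
  else
    let mid := PySem.Int.floordiv (lo + hi) 2
    let p1 := JtramSolve exit enter lo mid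
    let p2 := JtramSolve exit enter mid hi
    (p1.1 + p2.1, max p1.2 (p1.1 + p2.2))
termination_by (hi - lo).toNat
decreasing_by
  · have hm : PySem.Int.floordiv (lo + hi) 2 = (lo + hi) / 2 :=
      PySem.Int.floordiv_eq_ediv_of_pos (by omega)
    simp only [hm]; omega
  · have hm : PySem.Int.floordiv (lo + hi) 2 = (lo + hi) / 2 :=
      PySem.Int.floordiv_eq_ediv_of_pos (by omega)
    simp only [hm]; omega

def Jtram_alt (n : Int) (exit : List Int) (enter : List Int) : Int :=
  (JtramSolve exit enter 0 n).2

-- ===== PRECONDITION & SPEC =====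
-- Pre_ excludes exactly the inputs where Python A raises IndexError: n exceeding a list's length.
def Pre_Jtram (n : Int) (exit : List Int) (enter : List Int) : Prop :=
  n ≤ (exit.length : Int) ∧ n ≤ (enter.length : Int)
instance (n : Int) (exit : List Int) (enter : List Int) : Decidable (Pre_Jtram n exit enter) := by
  unfold Pre_Jtram; infer_instance
def pvWitness_Jtram : Int × List Int × List Int := (3, [1, 0, 2], [2, 3, 0])

def Spec_Jtram (n : Int) (exit : List Int) (enter : List Int) (out : Int) : Prop := out = Jtram_alt n exit enter
instance (n : Int) (exit : List Int) (enter : List Int) (out : Int) : Decidable (Spec_Jtram n exit enter out) := by unfold Spec_Jtram; infer_instance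

-- ===== CLAIM (what is proved, stated in full; the proofs are below) =====
def Claim_equal_Jtram : Prop := ∀ (n : Int) (exit : List Int) (enter : List Int), Dom_Jtram n exit enter → Pre_Jtram n exit enter → Spec_Jtram n exit enter (Jtram n exit enter)

-- ===== LEMMAS AND PROOFS =====

-- per-stop delta list on [lo,hi)
def pvDl (exit enter : List Int) (lo hi : Int) : List Int :=
  (PySem.List.pyRange lo hi 1).map
    (fun i => PySem.List.pyGetD enter i 0 - PySem.List.pyGetD exit i 0)

-- max prefix sum (including the empty prefix) of a delta list
def pvM : List Int → Int
  | [] => 0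
  | d :: t => max 0 (d + pvM t)

theorem pvM_nonneg (ds : List Int) : 0 ≤ pvM ds := by
  cases ds with
  | nil => simp [pvM]
  | cons d t => simp [pvM]

theorem pvM_append (xs ys : List Int) :
    pvM (xs ++ ys) = max (pvM xs) (xs.sum + pvM ys) := by
  induction xs with
  | nil =>
    simp only [List.nil_append, pvM, List.sum_nil, zero_add]
    have := pvM_nonneg ys; omega
  | cons d t ih =>
    simp only [List.cons_append, pvM, ih, List.sum_cons]
    omega

theorem pvDl_split (exit enter : List Int) (lo mid hi : Int)
    (h1 : lo ≤ mid) (h2 : mid ≤ hi) :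
    pvDl exit enter lo hi = pvDl exit enter lo mid ++ pvDl exit enter mid hi := by
  unfold pvDl
  rw [PySem.List.pyRange_one_append lo mid hi h1 h2, List.map_append]

theorem pvSolve_correct (exit enter : List Int) :
    ∀ (k : Nat) (lo hi : Int), (hi - lo).toNat = k →
      JtramSolve exit enter lo hi
        = ((pvDl exit enter lo hi).sum, pvM (pvDl exit enter lo hi)) := by
  intro k
  induction k using Nat.strong_induction_on with
  | _ k ih =>
    intro lo hi hk
    rw [JtramSolve]
    by_cases h1 : hi ≤ lo
    · rw [dif_pos h1]
      unfold pvDl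
      rw [PySem.List.pyRange_one_eq_nil h1]
      simp [pvM]
    · rw [dif_neg h1]
      by_cases h2 : hi - lo = 1
      · rw [dif_pos h2]
        have hhi : hi = lo + 1 := by omega
        unfold pvDl
        subst hhi
        rw [PySem.List.pyRange_one_singleton]
        simp [pvM]
      · rw [dif_neg h2]
        have hm : PySem.Int.floordiv (lo + hi) 2 = (lo + hi) / 2 :=
          PySem.Int.floordiv_eq_ediv_of_pos (by omega)
        have hb : lo < PySem.Int.floordiv (lo + hi) 2 ∧ PySem.Int.floordiv (lo + hi) 2 < hi := by
          rw [hm]; omega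
        dsimp only
        rw [ih (PySem.Int.floordiv (lo + hi) 2 - lo).toNat (by omega) lo _ rfl,
            ih (hi - PySem.Int.floordiv (lo + hi) 2).toNat (by omega) _ hi rfl]
        rw [pvDl_split exit enter lo (PySem.Int.floordiv (lo + hi) 2) hi (by omega) (by omega)]
        simp [pvM_append]

-- A's fold equals the running-max recursion over the delta list
def pvRun (m c : Int) : List Int → Int
  | [] => m
  | d :: ds => pvRun (max m (c + d)) (c + d) ds

theorem pvA_fold (L : List Int) (f g : Int → Int) : ∀ (m c : Int),
    (L.foldl (fun s i =>
        let ci := s.2 - f i + g i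
        (max s.1 ci, ci)) (m, c)).1
      = pvRun m c (L.map (fun i => g i - f i)) := by
  induction L with
  | nil => intro m c; rfl
  | cons x t ih =>
    intro m c
    simp only [List.foldl_cons, List.map_cons, pvRun]
    rw [show c - f x + g x = c + (g x - f x) by ring]
    exact ih _ _

theorem pvRun_eq_max_pvM (ds : List Int) : ∀ (m c : Int), c ≤ m →
    pvRun m c ds = max m (c + pvM ds) := by
  induction ds with
  | nil => intro m c h; simp [pvRun, pvM]; omega
  | cons d t ih =>
    intro m c h
    simp only [pvRun, pvM]
    rw [ih (max m (c + d)) (c + d) (le_max_right _ _)]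
    have := pvM_nonneg t
    omega

-- ===== VERDICT (by name: the statement is the Claim_ definition above) =====
theorem Jtram_spec : Claim_equal_Jtram := by
  intro n exit enter _ _
  unfold Spec_Jtram Jtram Jtram_alt
  rw [pvA_fold]
  rw [pvSolve_correct exit enter (n - 0).toNat 0 n rfl]
  show pvRun 0 0 (pvDl exit enter 0 n) = pvM (pvDl exit enter 0 n)
  rw [pvRun_eq_max_pvM _ 0 0 le_rfl]
  have := pvM_nonneg (pvDl exit enter 0 n)
  omega
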